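-- pv_equiv track=rewrite | github.com/daniel-reich/ubiquitous-fiesta | Y4gwcGfcGb3SKz6Tu_19.py | max_separator
-- ===== SOURCE A (Python) =====
-- from collections import Counter
--
-- def max_separator(str):
--     found, length = [], 0
--     for c, r in [cnt for cnt in Counter(str).most_common() if cnt[1] > 1]:
--         start = str.find(c, 0)
--         for _ in range(r - 1):
--             end = str.find(c, start + 1)
--             l = 1 + end - start
--             if l >= length:
--                 if l > length:
--                     found = []
--                 length = l
--                 found.append(c)
--             start = end
--     return sorted(found)
-- ===== SOURCE B (Python) =====
-- def max_separator(str):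
--     last = {}
--     best, hits = 0, []
--     for i, c in enumerate(str):
--         if c in last:
--             l = i - last[c] + 1
--             if l > best:
--                 best, hits = l, [c]
--             elif l == best:
--                 hits.append(c)
--         last[c] = i
--     return sorted(hits)
-- ===== Notes on version B (the rewrite author's own statement) =====
-- stated objective: faster
-- what changed: Replaces the Counter/most_common outer loop with repeated str.find scans per character by a single left-to-right pass that keeps each character's last position in a dict and updates the running maximal gap and its achievers on the fly.
import Mathlib
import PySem

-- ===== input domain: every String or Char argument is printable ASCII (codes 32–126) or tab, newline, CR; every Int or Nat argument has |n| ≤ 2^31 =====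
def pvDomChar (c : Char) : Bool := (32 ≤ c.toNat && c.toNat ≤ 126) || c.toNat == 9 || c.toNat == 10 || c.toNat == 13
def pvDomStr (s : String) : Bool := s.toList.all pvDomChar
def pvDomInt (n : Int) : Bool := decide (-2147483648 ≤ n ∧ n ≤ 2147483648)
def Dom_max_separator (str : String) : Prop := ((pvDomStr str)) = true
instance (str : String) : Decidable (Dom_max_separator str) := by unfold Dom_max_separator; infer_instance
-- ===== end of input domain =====

-- B replaces A's per-character str.find scan chains (driven by Counter.most_common) with one
-- left-to-right pass keeping each character's last position in a dict: objective 'faster'.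
-- Both ports collect the appended 1-char strings as Chars and convert after the final sort
-- (exact: Python's sort of 1-char strings is code-point order, = Char order).

-- ===== PORT A =====
def max_separator (str : String) : List String :=
  let cs := str.toList
  -- found, length = [], 0 ; for c, r in [cnt for cnt in Counter(str).most_common() if cnt[1] > 1]:
  let mcf := (PySem.List.sorted (PySem.Dict.counter cs).items (fun p => p.2) true).filter
      (fun p => p.2 > 1)
  let st := mcf.foldl (fun (st : List Char × Int) p =>
      let start := PySem.Chars.findFrom cs [p.1] 0 none      -- start = str.find(c, 0)
      let q := (PySem.List.pyRange 0 (p.2 - 1) 1).foldl      -- for _ in range(r - 1):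
        (fun (q : List Char × Int × Int) _ =>
          let e := PySem.Chars.findFrom cs [p.1] (q.2.2 + 1) none   -- end = str.find(c, start+1)
          let l := 1 + e - q.2.2
          if l ≥ q.2.1 then
            ((if l > q.2.1 then [] else q.1) ++ [p.1], l, e)        -- found=[] ; found.append(c)
          else (q.1, q.2.1, e))                                     -- start = end
        (st.1, st.2, start)
      (q.1, q.2.1)) ([], 0)
  (PySem.List.sorted st.1 (fun c => c) false).map (fun c => String.mk [c])

-- ===== PORT B =====
def max_separator_alt (str : String) : List String :=
  let st := (PySem.List.enumerate str.toList 0).foldl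
    (fun (st : PySem.Dict Char Int × Int × List Char) p =>
      let bh :=
        match st.1.get? p.2 with            -- if c in last:
        | some j =>
          let l := p.1 - j + 1              --   l = i - last[c] + 1
          if l > st.2.1 then (l, [p.2])     --   if l > best: best, hits = l, [c]
          else if l = st.2.1 then (st.2.1, st.2.2 ++ [p.2])   -- elif l == best: hits.append(c)
          else (st.2.1, st.2.2)
        | none => (st.2.1, st.2.2)
      (st.1.insert p.2 p.1, bh))            -- last[c] = i
    (PySem.Dict.empty, 0, [])
  (PySem.List.sorted st.2.2 (fun c => c) false).map (fun c => String.mk [c])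

-- ===== PRECONDITION & SPEC =====
def Spec_max_separator (str : String) (out : List String) : Prop := out = max_separator_alt str
instance (str : String) (out : List String) : Decidable (Spec_max_separator str out) := by unfold Spec_max_separator; infer_instance

-- ===== CLAIM (what is proved, stated in full; the proofs are below) =====
def Claim_equal_max_separator : Prop := ∀ (str : String), Dom_max_separator str → Spec_max_separator str (max_separator str)


-- ===== LEMMAS AND PROOFS =====

def pvStep (st : List Char × Int) (e : Char × Int) : List Char × Int :=
  if e.2 ≥ st.2 then ((if e.2 > st.2 then [] else st.1) ++ [e.1], e.2) else st
def pvMax (L : List (Char × Int)) (a : Int) : Int := L.foldl (fun m e => max m e.2) a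
lemma pvMax_cons (e : Char × Int) (L : List (Char × Int)) (a : Int) :
    pvMax (e :: L) a = pvMax L (max a e.2) := rfl
lemma le_pvMax (L : List (Char × Int)) (a : Int) : a ≤ pvMax L a := by
  induction L generalizing a with
  | nil => simp [pvMax]
  | cons e t ih => rw [pvMax_cons]; exact le_trans (le_max_left a e.2) (ih _)
lemma pvStep_foldl (L : List (Char × Int)) (f : List Char) (len : Int) :
    L.foldl pvStep (f, len) =
      ((if len < pvMax L len then [] else f) ++
        (L.filter (fun e => e.2 == pvMax L len)).map (·.1), pvMax L len) := by
  induction L generalizing f len with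
  | nil => simp [pvMax]
  | cons e t ih =>
    rcases lt_trichotomy e.2 len with h | h | h
    · have hst : pvStep (f, len) e = (f, len) := by simp [pvStep, not_le.mpr h]
      have hm : max len e.2 = len := by omega
      rw [List.foldl_cons, hst, ih, pvMax_cons, hm]
      have hle := le_pvMax t len
      have hne : (e.2 == pvMax t len) = false := by
        simp only [beq_eq_false_iff_ne, ne_eq]; omega
      simp [hne]
    · have hst : pvStep (f, len) e = (f ++ [e.1], len) := by simp [pvStep, h]
      have hm : max len e.2 = len := by omega
      rw [List.foldl_cons, hst, ih, pvMax_cons, hm]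
      by_cases hlt : len < pvMax t len
      · have hne : (e.2 == pvMax t len) = false := by
          simp only [beq_eq_false_iff_ne, ne_eq]; omega
        simp [hne, hlt]
      · have heq : pvMax t len = len := le_antisymm (by omega) (le_pvMax t len)
        have hee : (e.2 == pvMax t len) := by simp [heq, h]
        simp [heq, h]
    · have hst : pvStep (f, len) e = ([e.1], e.2) := by simp [pvStep, h, le_of_lt h]
      have hm : max len e.2 = e.2 := by omega
      rw [List.foldl_cons, hst, ih, pvMax_cons, hm]
      have hlen : len < pvMax t e.2 := lt_of_lt_of_le h (le_pvMax t e.2)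
      by_cases hlt : e.2 < pvMax t e.2
      · have hne : (e.2 == pvMax t e.2) = false := by
          simp only [beq_eq_false_iff_ne, ne_eq]; omega
        simp [hne, hlt, hlen]
      · have heq : pvMax t e.2 = e.2 := le_antisymm (by omega) (le_pvMax t e.2)
        have hee : (e.2 == pvMax t e.2) := by simp [heq]
        simp [heq]
        intro hle; exact absurd hle (by omega)

def pvOccs (cs : List Char) (c : Char) : List Int :=
  ((PySem.List.enumerate cs 0).filter (fun p => p.2 == c)).map (·.1)

lemma pvOccs_append (l : List Char) (x c : Char) :
    pvOccs (l ++ [x]) c = pvOccs l c ++ (if x == c then [(l.length : Int)] else []) := by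
  unfold pvOccs
  rw [PySem.List.enumerate_append, List.filter_append, List.map_append]
  congr 1
  by_cases h : x == c <;>
    simp [PySem.List.enumerate_cons, PySem.List.enumerate_nil, h]

lemma mem_pvOccs {cs : List Char} {c : Char} {j : Int} :
    j ∈ pvOccs cs c ↔ ∃ (k : Nat) (h : k < cs.length), j = (k : Int) ∧ cs[k] = c := by
  unfold pvOccs
  simp only [List.mem_map, List.mem_filter, PySem.List.mem_enumerate_iff]
  constructor
  · rintro ⟨p, ⟨⟨k, hk, rfl⟩, hc⟩, rfl⟩
    refine ⟨k, hk, by simp, by simpa using hc⟩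
  · rintro ⟨k, hk, rfl, hc⟩
    exact ⟨((k : Int), cs[k]), ⟨⟨k, hk, by simp⟩, by simpa using hc⟩, rfl⟩

lemma pvOccs_pairwise (cs : List Char) (c : Char) : (pvOccs cs c).Pairwise (· < ·) := by
  unfold pvOccs
  exact List.pairwise_map.mpr (((PySem.List.pairwise_lt_enumerate cs 0).sublist
    List.filter_sublist).imp (fun h => h))

lemma pvOccs_length (cs : List Char) (c : Char) : (pvOccs cs c).length = cs.count c := by
  unfold pvOccs
  rw [List.length_map, ← List.countP_eq_length_filter]
  have := PySem.List.map_snd_enumerate cs (0 : Int)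
  calc List.countP (fun p => p.2 == c) (PySem.List.enumerate cs 0)
      = List.countP (fun x => x == c) ((PySem.List.enumerate cs 0).map (·.2)) := by
        rw [List.countP_map]; rfl
    _ = cs.count c := by rw [this]; rfl

lemma singleton_prefix_drop (cs : List Char) (c : Char) (i : Nat) :
    [c] <+: cs.drop i ↔ cs[i]? = some c := by
  rw [← List.head?_drop]
  cases h : cs.drop i with
  | nil => simp
  | cons a t => simp [List.prefix_cons_iff, eq_comm]

lemma mem_pvOccs_bounds {cs : List Char} {c : Char} {j : Int} (h : j ∈ pvOccs cs c) :
    0 ≤ j ∧ j.toNat < cs.length ∧ cs[j.toNat]? = some c := by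
  obtain ⟨k, hk, rfl, hc⟩ := mem_pvOccs.mp h
  simp [hk, hc]

lemma findFrom_least (cs : List Char) (c : Char) (k : Nat) (hk : k ≤ cs.length) (b : Int)
    (hb : b ∈ pvOccs cs c) (hkb : (k : Int) ≤ b)
    (hmin : ∀ j ∈ pvOccs cs c, (k : Int) ≤ j → b ≤ j) :
    PySem.Chars.findFrom cs [c] (k : Int) none = b := by
  obtain ⟨hb0, hblt, hbc⟩ := mem_pvOccs_bounds hb
  have hne : PySem.Chars.findFrom cs [c] (k : Int) none ≠ -1 := by
    rw [Ne, PySem.Chars.findFrom_natCast_eq_neg_one_iff cs [c] k hk]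
    simp only [not_not, List.singleton_infix_iff]
    rw [List.mem_drop_iff_getElem]
    refine ⟨b.toNat - k, by omega, ?_⟩
    have hidx : k + (b.toNat - k) = b.toNat := by omega
    obtain ⟨h1, h2⟩ := List.getElem?_eq_some_iff.mp hbc
    simp only [hidx]
    exact h2
  obtain ⟨h1, h2, h3⟩ := PySem.Chars.findFrom_natCast_spec cs [c] k hk hne
  set v := PySem.Chars.findFrom cs [c] (k : Int) none with hv
  rw [singleton_prefix_drop] at h2
  have hvlt : v.toNat < cs.length := (List.getElem?_eq_some_iff.mp h2).1
  have hvc : cs[v.toNat] = c := by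
    have := (List.getElem?_eq_some_iff.mp h2).2; simpa using this
  have hvmem : v ∈ pvOccs cs c := mem_pvOccs.mpr ⟨v.toNat, hvlt, by omega, hvc⟩
  have hvb : b ≤ v := hmin v hvmem h1
  have hbv : ¬ (b.toNat < v.toNat) := by
    intro hlt
    exact h3 b.toNat (by omega) hlt (by rw [singleton_prefix_drop]; exact hbc)
  omega

lemma pvOccs_chain (cs : List Char) (c : Char) :
    (pvOccs cs c).IsChain (fun a b => PySem.Chars.findFrom cs [c] (a + 1) none = b) := by
  rw [List.isChain_iff_getElem]
  intro i hi
  have hpw := List.pairwise_iff_getElem.mp (pvOccs_pairwise cs c)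
  have hamem : (pvOccs cs c)[i] ∈ pvOccs cs c := List.getElem_mem _
  have hbmem : (pvOccs cs c)[i+1] ∈ pvOccs cs c := List.getElem_mem _
  obtain ⟨ha0, halt, hac⟩ := mem_pvOccs_bounds hamem
  obtain ⟨hb0, hblt, hbc⟩ := mem_pvOccs_bounds hbmem
  have hab : (pvOccs cs c)[i] < (pvOccs cs c)[i+1] := hpw i (i+1) (by omega) hi (by omega)
  have hcast : (pvOccs cs c)[i] + 1 = (((pvOccs cs c)[i].toNat + 1 : Nat) : Int) := by omega
  rw [hcast]
  apply findFrom_least cs c ((pvOccs cs c)[i].toNat + 1) (by omega) _ hbmem (by omega)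
  intro j hj hkj
  obtain ⟨m, hm, rfl⟩ := List.mem_iff_getElem.mp hj
  rcases lt_trichotomy m (i+1) with hlt | heq | hgt
  · have hle : (pvOccs cs c)[m] ≤ (pvOccs cs c)[i] := by
      rcases Nat.lt_or_ge m i with h' | h'
      · exact le_of_lt (hpw m i hm (by omega) h')
      · have hmi : m = i := by omega
        subst hmi; exact le_refl _
    omega
  · subst heq; exact le_refl _
  · exact le_of_lt (hpw (i+1) m hi hm hgt)

def pvGaps (c : Char) (ps : List Int) : List (Char × Int) :=
  (ps.zip ps.tail).map (fun q => (c, 1 + q.2 - q.1))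

def pvAStep (cs : List Char) (c : Char) (q : List Char × Int × Int) : List Char × Int × Int :=
  let e := PySem.Chars.findFrom cs [c] (q.2.2 + 1) none
  let l := 1 + e - q.2.2
  if l ≥ q.2.1 then ((if l > q.2.1 then [] else q.1) ++ [c], l, e) else (q.1, q.2.1, e)

lemma pvAStep_iter (cs : List Char) (c : Char) (rest : List Int) (p : Int)
    (st : List Char × Int)
    (hch : (p :: rest).IsChain (fun a b => PySem.Chars.findFrom cs [c] (a + 1) none = b)) :
    (pvAStep cs c)^[rest.length] (st.1, st.2, p) =
      ((List.foldl pvStep st (pvGaps c (p :: rest))).1,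
       (List.foldl pvStep st (pvGaps c (p :: rest))).2,
       (p :: rest).getLast (by simp)) := by
  induction rest generalizing p st with
  | nil => simp [pvGaps]
  | cons b rest' ih =>
    obtain ⟨hfb, hch'⟩ := List.isChain_cons_cons.mp hch
    have hF : pvAStep cs c (st.1, st.2, p) =
        ((pvStep st (c, 1 + b - p)).1, (pvStep st (c, 1 + b - p)).2, b) := by
      simp only [pvAStep, hfb, pvStep]
      by_cases h1 : 1 + b - p ≥ st.2
      · simp [h1]
      · simp [h1]
    rw [List.length_cons, Function.iterate_succ_apply, hF]
    have := ih b (pvStep st (c, 1 + b - p)) hch'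
    rw [this]
    simp [pvGaps, List.getLast_cons]

lemma foldl_ignore_eq_iterate {α β : Type} (l : List β) (F : α → α) (init : α) :
    l.foldl (fun s _ => F s) init = F^[l.length] init := by
  induction l generalizing init with
  | nil => rfl
  | cons x t ih => simpa [Function.iterate_succ_apply] using ih (F init)

lemma a_char (cs : List Char) (c : Char) (r : Int) (hr : r = (cs.count c : Int)) (h2 : 1 < r)
    (st : List Char × Int) :
    (let start := PySem.Chars.findFrom cs [c] 0 none
     let q := (PySem.List.pyRange 0 (r - 1) 1).foldl (fun q _ => pvAStep cs c q) (st.1, st.2, start)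
     ((q.1, q.2.1) : List Char × Int)) = List.foldl pvStep st (pvGaps c (pvOccs cs c)) := by
  have hlen : (pvOccs cs c).length = cs.count c := pvOccs_length cs c
  obtain ⟨h, t, hht⟩ : ∃ h t, pvOccs cs c = h :: t := by
    cases hocc : pvOccs cs c with
    | nil => rw [hocc] at hlen; simp at hlen; omega
    | cons a b => exact ⟨a, b, rfl⟩
  have htlen : (t.length : Int) = r - 1 := by
    rw [hht] at hlen; simp at hlen; omega
  have hstart : PySem.Chars.findFrom cs [c] 0 none = h := by
    have h0 : ((0 : Nat) : Int) = (0 : Int) := rfl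
    rw [← h0]
    apply findFrom_least cs c 0 (by omega) h (by rw [hht]; exact List.mem_cons_self)
      (by have := mem_pvOccs_bounds (by rw [hht]; exact List.mem_cons_self : h ∈ pvOccs cs c); omega)
    intro j hj _
    rw [hht] at hj
    rcases List.mem_cons.mp hj with rfl | hjt
    · exact le_refl _
    · have := List.pairwise_cons.mp (by rw [← hht]; exact pvOccs_pairwise cs c)
      exact le_of_lt (this.1 j hjt)
  have hchain := pvOccs_chain cs c
  rw [hht] at hchain
  have hiter := pvAStep_iter cs c t h st hchain
  simp only [hstart]
  rw [foldl_ignore_eq_iterate, PySem.List.length_pyRange_one]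
  have hn : (r - 1 - 0).toNat = t.length := by omega
  rw [hn, hiter, hht]

def pvMcf (cs : List Char) : List (Char × Int) :=
  (PySem.List.sorted (PySem.Dict.counter cs).items (fun p => p.2) true).filter (fun p => p.2 > 1)

def pvLA (cs : List Char) : List (Char × Int) :=
  (pvMcf cs).flatMap (fun p => pvGaps p.1 (pvOccs cs p.1))

lemma mem_pvMcf {cs : List Char} {p : Char × Int} (h : p ∈ pvMcf cs) :
    p.2 = (cs.count p.1 : Int) ∧ 1 < p.2 := by
  obtain ⟨hmem, hgt⟩ := List.mem_filter.mp h
  rw [PySem.List.mem_sorted, PySem.Dict.items_counter] at hmem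
  obtain ⟨k, _, hk⟩ := List.mem_map.mp hmem
  constructor
  · rw [← hk]
  · simpa using hgt

lemma fst_mem_pvMcf {cs : List Char} {c : Char} (h : 1 < cs.count c) :
    c ∈ (pvMcf cs).map (·.1) := by
  have hmem : (c, (cs.count c : Int)) ∈ (PySem.Dict.counter cs).items := by
    rw [PySem.Dict.items_counter]
    exact List.mem_map.mpr ⟨c, (PySem.Set.mem_ofList cs c).mpr
      (List.count_pos_iff.mp (by omega)), rfl⟩
  refine List.mem_map.mpr ⟨(c, (cs.count c : Int)), ?_, rfl⟩
  exact List.mem_filter.mpr ⟨(PySem.List.mem_sorted _ _ _ _).mpr hmem, by simp; omega⟩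

lemma nodup_fst_pvMcf (cs : List Char) : ((pvMcf cs).map (·.1)).Nodup := by
  have h1 : ((PySem.Dict.counter cs).items.map (·.1)).Nodup := PySem.Dict.nodup_keys_counter cs
  have h2 := (PySem.List.sorted_perm (PySem.Dict.counter cs).items (fun p => p.2) true).map (·.1)
  have h3 : ((PySem.List.sorted (PySem.Dict.counter cs).items (fun p => p.2) true).map (·.1)).Nodup :=
    h2.nodup_iff.mpr h1
  exact (List.Sublist.map (fun (p : Char × Int) => p.1)
    (List.filter_sublist (p := fun p => p.2 > 1))).nodup h3

lemma foldl_foldl_flatMap {α : Type} (g : α → List (Char × Int)) (l : List α)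
    (st : List Char × Int) :
    l.foldl (fun st x => (g x).foldl pvStep st) st = (l.flatMap g).foldl pvStep st := by
  induction l generalizing st with
  | nil => rfl
  | cons x t ih => simp [List.foldl_append, ih]

lemma a_eq (s : String) :
    max_separator s =
      (PySem.List.sorted ((List.foldl pvStep ([], 0) (pvLA s.toList)).1) (fun c => c) false).map
        (fun c => String.mk [c]) := by
  show (PySem.List.sorted ((pvMcf s.toList).foldl (fun (st : List Char × Int) p =>
      let start := PySem.Chars.findFrom s.toList [p.1] 0 none
      let q := (PySem.List.pyRange 0 (p.2 - 1) 1).foldl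
        (fun q _ => pvAStep s.toList p.1 q) (st.1, st.2, start)
      ((q.1, q.2.1) : List Char × Int)) ([], 0)).1 (fun c => c) false).map
        (fun c => String.mk [c]) = _
  rw [PySem.List.foldl_congr_mem (pvMcf s.toList)
    (fun (st : List Char × Int) p =>
      let start := PySem.Chars.findFrom s.toList [p.1] 0 none
      let q := (PySem.List.pyRange 0 (p.2 - 1) 1).foldl
        (fun q _ => pvAStep s.toList p.1 q) (st.1, st.2, start)
      ((q.1, q.2.1) : List Char × Int))
    (fun st p => List.foldl pvStep st (pvGaps p.1 (pvOccs s.toList p.1))) ([], 0)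
    (fun st p hp => a_char s.toList p.1 p.2 (mem_pvMcf hp).1
      (by have := mem_pvMcf hp; omega) st)]
  rw [foldl_foldl_flatMap]
  rfl

def pvEvents (l : List Char) : List (Char × Int) :=
  (PySem.List.enumerate l 0).flatMap (fun p =>
    match (pvOccs (l.take p.1.toNat) p.2).getLast? with
    | some j => [(p.2, 1 + p.1 - j)]
    | none => [])

lemma pvEvents_append (l : List Char) (x : Char) :
    pvEvents (l ++ [x]) = pvEvents l ++
      (match (pvOccs l x).getLast? with
       | some j => [(x, 1 + (l.length : Int) - j)]
       | none => []) := by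
  unfold pvEvents
  rw [PySem.List.enumerate_append, List.flatMap_append]
  congr 1
  · apply List.flatMap_congr
    intro p hp
    obtain ⟨k, hk, rfl⟩ := (PySem.List.mem_enumerate_iff l 0 p).mp hp
    have h1 : ((0 : Int) + (k : Int)).toNat = k := by omega
    rw [h1, List.take_append_of_le_length (by omega)]
  · simp [PySem.List.enumerate_cons, PySem.List.enumerate_nil]

def pvBBody (st : PySem.Dict Char Int × Int × List Char) (p : Int × Char) :
    PySem.Dict Char Int × Int × List Char :=
  let bh :=
    match st.1.get? p.2 with
    | some j =>
      let gl := p.1 - j + 1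
      if gl > st.2.1 then (gl, [p.2])
      else if gl = st.2.1 then (st.2.1, st.2.2 ++ [p.2])
      else (st.2.1, st.2.2)
    | none => (st.2.1, st.2.2)
  (st.1.insert p.2 p.1, bh)

lemma b_fold (l : List Char) :
    (((PySem.List.enumerate l 0).foldl pvBBody (PySem.Dict.empty, 0, [])).2 =
      ((List.foldl pvStep ([], 0) (pvEvents l)).2, (List.foldl pvStep ([], 0) (pvEvents l)).1))
    ∧ ∀ c, ((PySem.List.enumerate l 0).foldl pvBBody (PySem.Dict.empty, 0, [])).1.get? c
        = (pvOccs l c).getLast? := by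
  induction l using List.reverseRecOn with
  | nil =>
    refine ⟨rfl, fun c => rfl⟩
  | append_singleton l x ih =>
    obtain ⟨ih1, ih2⟩ := ih
    rw [PySem.List.enumerate_append]
    simp only [PySem.List.enumerate_cons, PySem.List.enumerate_nil, zero_add]
    rw [List.foldl_append]
    rw [pvEvents_append]
    set S := (PySem.List.enumerate l 0).foldl pvBBody (PySem.Dict.empty, 0, []) with hS
    set F := List.foldl pvStep ([], 0) (pvEvents l) with hF
    have hgx := ih2 x
    cases hocc : (pvOccs l x).getLast? with
    | none =>
      rw [hocc] at hgx
      constructor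
      · simp only [List.foldl_cons, List.foldl_nil, pvBBody, hgx]
        rw [List.append_nil]
        exact ih1
      · intro c
        simp only [List.foldl_cons, List.foldl_nil, pvBBody, hgx]
        rw [PySem.Dict.get?_insert]
        rw [pvOccs_append]
        by_cases hc : c = x
        · subst hc
          simp only [beq_self_eq_true, if_pos]
          simp
        · have hxc : (x == c) = false := by simp [Ne.symm hc]
          simp only [if_neg hc, hxc]
          simp [ih2 c]
    | some j =>
      rw [hocc] at hgx
      have hsnd : S.2 = (F.2, F.1) := ih1
      have hev : List.foldl pvStep ([], 0) (pvEvents l ++ [(x, 1 + (l.length : Int) - j)]) =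
          pvStep F (x, 1 + (l.length : Int) - j) := by
        rw [List.foldl_append, ← hF, List.foldl_cons, List.foldl_nil]
      constructor
      · simp only [List.foldl_cons, List.foldl_nil, pvBBody, hgx, hev]
        have hgl : (l.length : Int) - j + 1 = 1 + (l.length : Int) - j := by omega
        rw [hsnd]
        simp only [pvStep, hgl]
        by_cases h1 : 1 + (l.length : Int) - j > F.2
        · simp [h1, le_of_lt h1]
        · by_cases h2 : 1 + (l.length : Int) - j = F.2
          · simp [h2]
          · have h3 : ¬ (1 + (l.length : Int) - j ≥ F.2) := by omega
            simp [h1, h2, h3]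
      · intro c
        simp only [List.foldl_cons, List.foldl_nil, pvBBody, hgx]
        rw [PySem.Dict.get?_insert]
        rw [pvOccs_append]
        by_cases hc : c = x
        · subst hc
          simp only [beq_self_eq_true, if_pos]
          simp
        · have hxc : (x == c) = false := by simp [Ne.symm hc]
          simp only [if_neg hc, hxc]
          simp [ih2 c]

lemma b_eq (s : String) :
    max_separator_alt s =
      (PySem.List.sorted ((List.foldl pvStep ([], 0) (pvEvents s.toList)).1) (fun c => c) false).map
        (fun c => String.mk [c]) := by
  show (PySem.List.sorted (((PySem.List.enumerate s.toList 0).foldl pvBBody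
      (PySem.Dict.empty, 0, [])).2.2) (fun c => c) false).map (fun c => String.mk [c]) = _
  rw [(b_fold s.toList).1]

lemma pvGaps_append (c : Char) (ps : List Int) (n j : Int) (h : ps.getLast? = some j) :
    pvGaps c (ps ++ [n]) = pvGaps c ps ++ [(c, 1 + n - j)] := by
  induction ps with
  | nil => simp at h
  | cons a t ih =>
    cases t with
    | nil =>
      simp at h
      subst h
      rfl
    | cons b r =>
      have h' : (b :: r).getLast? = some j := by
        rw [List.getLast?_cons_cons] at h; exact h
      have := ih h'
      show pvGaps c (a :: (b :: r) ++ [n]) = _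
      rw [show (a :: (b :: r) ++ [n]) = a :: ((b :: r) ++ [n]) from rfl]
      rw [show ((b :: r) ++ [n]) = b :: (r ++ [n]) from rfl]
      rw [show pvGaps c (a :: b :: (r ++ [n])) = (c, 1 + b - a) :: pvGaps c (b :: (r ++ [n])) from rfl]
      rw [show pvGaps c (a :: b :: r) = (c, 1 + b - a) :: pvGaps c (b :: r) from rfl]
      rw [List.cons_append]
      exact congrArg _ this

lemma pvEvents_filter (l : List Char) (c : Char) :
    (pvEvents l).filter (fun p => p.1 == c) = pvGaps c (pvOccs l c) := by
  induction l using List.reverseRecOn with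
  | nil => rfl
  | append_singleton l x ih =>
    rw [pvEvents_append, List.filter_append, ih, pvOccs_append]
    by_cases hc : x = c
    · subst hc
      simp only [beq_self_eq_true, if_pos]
      cases hocc : (pvOccs l x).getLast? with
      | none =>
        have hnil : pvOccs l x = [] := List.getLast?_eq_none_iff.mp hocc
        simp [hnil, pvGaps]
      | some j =>
        rw [pvGaps_append x _ _ _ hocc]
        simp
    · have hxc : (x == c) = false := by simp [hc]
      simp only [hxc]
      cases hocc : (pvOccs l x).getLast? with
      | none => simp
      | some j => simp [hxc]

lemma count_pvGaps_ne {c c' : Char} {g : Int} (ps : List Int) (h : c' ≠ c) :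
    (pvGaps c' ps).count (c, g) = 0 := by
  rw [List.count_eq_zero]
  intro hmem
  obtain ⟨q, _, hq⟩ := List.mem_map.mp hmem
  exact h (congrArg Prod.fst hq)

lemma count_flatMap_gaps (cs : List Char) (L : List (Char × Int)) (c : Char) (g : Int)
    (hnd : (L.map (·.1)).Nodup) :
    (L.flatMap (fun p => pvGaps p.1 (pvOccs cs p.1))).count (c, g) =
      if c ∈ L.map (·.1) then (pvGaps c (pvOccs cs c)).count (c, g) else 0 := by
  induction L with
  | nil => simp
  | cons p t ih =>
    simp only [List.map_cons, List.nodup_cons] at hnd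
    rw [List.flatMap_cons, List.count_append, ih hnd.2]
    by_cases hc : c = p.1
    · subst hc
      have hnotin : p.1 ∉ t.map (·.1) := hnd.1
      simp [hnotin]
    · rw [count_pvGaps_ne _ (Ne.symm hc)]
      by_cases hm : c ∈ t.map (·.1) <;> simp [hm, hc]

lemma gaps_nil_of_count_le_one {cs : List Char} {c : Char} (h : cs.count c ≤ 1) :
    pvGaps c (pvOccs cs c) = [] := by
  have hlen := pvOccs_length cs c
  cases hocc : pvOccs cs c with
  | nil => rfl
  | cons a t =>
    rw [hocc] at hlen
    cases t with
    | nil => rfl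
    | cons b r => simp at hlen; omega

lemma count_pvLA (cs : List Char) (c : Char) (g : Int) :
    (pvLA cs).count (c, g) = (pvGaps c (pvOccs cs c)).count (c, g) := by
  unfold pvLA
  rw [count_flatMap_gaps cs _ c g (nodup_fst_pvMcf cs)]
  by_cases hmem : c ∈ (pvMcf cs).map (·.1)
  · rw [if_pos hmem]
  · rw [if_neg hmem]
    have hcount : cs.count c ≤ 1 := by
      by_contra h
      exact hmem (fst_mem_pvMcf (by omega))
    rw [gaps_nil_of_count_le_one hcount]
    rfl

lemma pvLA_perm_pvEvents (cs : List Char) : (pvLA cs).Perm (pvEvents cs) := by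
  rw [List.perm_iff_count]
  rintro ⟨c, g⟩
  rw [count_pvLA]
  have := pvEvents_filter cs c
  rw [← this, List.count_filter (by simp)]

lemma pvMax_eq_foldl_map (L : List (Char × Int)) (a : Int) :
    pvMax L a = (L.map (·.2)).foldl max a := by
  induction L generalizing a with
  | nil => rfl
  | cons e t ih => rw [pvMax_cons, List.map_cons, List.foldl_cons, ih]

lemma pvMax_perm {L L' : List (Char × Int)} (h : L.Perm L') (a : Int) :
    pvMax L a = pvMax L' a := by
  rw [pvMax_eq_foldl_map, pvMax_eq_foldl_map]
  haveI h1 : Std.Commutative (fun (a b : Int) => max a b) := ⟨max_comm⟩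
  haveI h2 : Std.Associative (fun (a b : Int) => max a b) := ⟨max_assoc⟩
  exact (h.map (·.2)).foldl_op_eq (op := fun (a b : Int) => max a b)

-- ===== VERDICT (by name: the statement is the Claim_ definition above) =====
theorem max_separator_spec : Claim_equal_max_separator := by
  intro s _
  unfold Spec_max_separator
  rw [a_eq, b_eq]
  have hperm := pvLA_perm_pvEvents s.toList
  have hM := pvMax_perm hperm 0
  rw [pvStep_foldl, pvStep_foldl, hM]
  have hpf : ((pvLA s.toList).filter (fun e => e.2 == pvMax (pvEvents s.toList) 0)).Perm
      ((pvEvents s.toList).filter (fun e => e.2 == pvMax (pvEvents s.toList) 0)) :=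
    hperm.filter _
  have hp2 := hpf.map (·.1)
  simp only [ite_self, List.nil_append]
  rw [(PySem.List.sorted_id_eq_sorted_id_iff_perm _ _).mpr hp2]
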